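-- pv_equiv track=rewrite | github.com/sooo19/coding-test-study | [python] 프로그래머스/프로그래머스 강의/[BFS]송아지찾기.py | solution
-- ===== SOURCE A (Python) =====
-- from collections import deque
--
-- def solution(s, e):
--     check = [0]*10001       # 1~10000까지의 좌표 번호 (방문 여부 체크 배열)
--     queue = deque()
--     queue.append(s)     # 현수의 처음 위치를 큐에 삽입
--     check[s] = 1        # 처음 넣은 값도 방문여부 체크해줘야 함 (안해서 런타임에러 발생했었음)
--
--     L = 0       # BFS의 현재 레벨 (정답을 담는 변수)
--     while(queue):
--         length = len(queue)
--         for _ in range(length):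
--             now = queue.popleft()       # queue에 들어있는 숫자들을 하나씩 모두 pop하면서 이동 후의 좌표 값을 구함
--             for nx in [now-1, now+1, now+5]:
--                 if nx == e:
--                     return L+1      # 다음 노드가 e와 같으면, queue에 넣지 않고도 바로 Level에 1 추가한 값을 리턴 (넣고 빼서 발견하지 말기)
--                 # if check[nx] == 0 and nx > 0 and nx <= 10000:       # 방문하지 않았던 노드이고, 최대&최소 좌표범위 내에 들어오면
--                 if nx > 0 and nx <= 10000 and check[nx] == 0:
--                     check[nx] = 1
--                     queue.append(nx)        # 해당 노드로 이동
--         L += 1      # 레벨 증가시킴 (다음 레벨로 넘어감)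
-- ===== SOURCE B (Python) =====
-- def solution(s, e):
--     # Bit-parallel reachability: the visited set lives in one big integer bitmask
--     # (bit x = cell x); each round ORs in all shifted copies of the mask at once
--     # (moves -1, +1, +5), and the goal test reads only the three in-neighbour
--     # bits of e.  No queue, no frontier list, no per-node work.
--     BOARD = ((1 << 10000) - 1) << 1          # bits 1..10000 = the board
--     reach = 1 << s
--     moves = 0
--     while True:
--         if any(1 <= x <= 10000 and (reach >> x) & 1 for x in (e + 1, e - 1, e - 5)):
--             return moves + 1
--         nxt = (reach | reach << 1 | reach >> 1 | reach << 5) & BOARD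
--         if nxt == reach:
--             return None
--         reach = nxt
--         moves += 1
-- ===== Notes on version B (the rewrite author's own statement) =====
-- stated objective: alternative
-- what changed: Replaces A's deque-based level-synchronized BFS (popping nodes one at a time, marking a 10001-cell check list, early-returning per neighbour) by bit-parallel reachability iteration: the visited set is a single big-integer bitmask, each round is one shift/OR/mask expression expanding every frontier node at once, and the goal test reads only the three in-neighbour bits of e; no queue or per-node loop exists.
-- outside the precondition, e.g. on solution(-3, 2): A returns 1, B raises ValueError; on solution(0, 1): A returns 1, B returns 3; on solution(5, 10006): A returns None, B returns None
import Mathlib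
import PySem

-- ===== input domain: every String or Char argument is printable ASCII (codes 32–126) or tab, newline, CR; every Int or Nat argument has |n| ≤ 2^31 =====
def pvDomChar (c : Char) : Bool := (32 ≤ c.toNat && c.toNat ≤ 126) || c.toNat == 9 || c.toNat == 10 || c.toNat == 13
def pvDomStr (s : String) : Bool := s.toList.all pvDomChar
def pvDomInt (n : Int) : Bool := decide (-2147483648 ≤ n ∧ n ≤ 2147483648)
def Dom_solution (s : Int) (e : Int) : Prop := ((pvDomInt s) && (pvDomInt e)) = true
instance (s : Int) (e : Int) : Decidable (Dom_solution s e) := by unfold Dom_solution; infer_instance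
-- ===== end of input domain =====

-- B replaces A's deque-based level BFS by bit-parallel reachability iteration: the visited
-- set is one big-integer bitmask, a round is a single shift/OR/mask expression, and the goal
-- test reads only the three in-neighbour bits of e; objective: alternative algorithm.

-- ===== PORT A =====
-- Python's `check` list ([0]*10001) is ported as an Array Int of length 10001; every index A
-- reads or writes under Pre_solution lies in 1..10000 (the guard precedes check[nx], and
-- check[s] has 1 ≤ s ≤ 10000 under Pre_), so `.toNat` indexing is exact there; the
-- negative-index wraparound / IndexError Python shows for other s lie outside Pre_solution.
-- The `while queue` loop is ported with a fuel counter (a totality guard only; 20000 exceeds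
-- any possible number of BFS levels); `none` is Python's fall-through `return None`,
-- which Pre_solution excludes.

-- inner `for nx in [now-1, now+1, now+5]` loop (early return, marking, appending)
def aNbr (e L : Int) : List Int → Array Int → List Int → Option Int × Array Int × List Int
  | [], check, next => (none, check, next)
  | nx :: rest, check, next =>
    if nx = e then (some (L + 1), check, next)
    else if nx > 0 ∧ nx ≤ 10000 ∧ check[nx.toNat]! = 0 then
      aNbr e L rest (check.set! nx.toNat 1) (next ++ [nx])
    else
      aNbr e L rest check next

-- `for _ in range(length)` loop: pop each node of the current level in order
def aLevel (e L : Int) : List Int → Array Int → List Int → Option Int × Array Int × List Int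
  | [], check, next => (none, check, next)
  | now :: rest, check, next =>
    match aNbr e L [now - 1, now + 1, now + 5] check next with
    | (some r, c, n) => (some r, c, n)
    | (none, c, n) => aLevel e L rest c n

-- `while queue:` — the deque at the top of an iteration holds exactly the current level,
-- appended nodes form the next level
def aLoop (e : Int) : Nat → List Int → Array Int → Int → Option Int
  | 0, _, _, _ => none
  | fuel + 1, queue, check, L =>
    if queue.isEmpty then none
    else
      match aLevel e L queue check [] with
      | (some r, _, _) => some r
      | (none, c, next) => aLoop e fuel next c (L + 1)

def solution (s e : Int) : Int :=
  (aLoop e 20000 [s] ((Array.replicate 10001 0).set! s.toNat 1) 0).getD 0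

-- ===== PORT B =====
-- Source B's big-integer bitmask is a Nat; `(reach >> x) & 1` is `Nat.testBit`, `1 << s` is
-- `1 <<< s.toNat` (exact for the s ≥ 0 admitted by Pre_solution; Python raises ValueError
-- for negative s). The `while True` loop carries the same fuel-style totality guard as
-- port A; `none` is Source B's `return None`, which Pre_solution excludes.

-- BOARD = ((1 << 10000) - 1) << 1, bits 1..10000
def bBoard : Nat := ((1 <<< 10000) - 1) <<< 1

-- nxt = (reach | reach << 1 | reach >> 1 | reach << 5) & BOARD
def bNext (reach : Nat) : Nat :=
  (reach ||| reach <<< 1 ||| reach >>> 1 ||| reach <<< 5) &&& bBoard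

-- any(1 <= x <= 10000 and (reach >> x) & 1 for x in (e+1, e-1, e-5))
def bHit (reach : Nat) (e : Int) : Bool :=
  [e + 1, e - 1, e - 5].any fun x => decide (1 ≤ x) && decide (x ≤ 10000) && reach.testBit x.toNat

-- while True:
def bLoop (e : Int) : Nat → Nat → Int → Option Int
  | 0, _, _ => none
  | fuel + 1, reach, moves =>
    if bHit reach e then some (moves + 1)
    else
      let nxt := bNext reach
      if nxt = reach then none
      else bLoop e fuel nxt (moves + 1)

def solution_alt (s e : Int) : Int :=
  (bLoop e 20000 (1 <<< s.toNat) 0).getD 0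

-- ===== PRECONDITION & SPEC =====
-- Pre_ restricts to the problem's board: start positions 1..10000 (outside them Python A
-- raises IndexError on check[s], or silently searches from a wrapped / off-board cell — an
-- accidental behaviour nobody specifies) and targets 0..10005 (exactly the e values the
-- search can meet; outside them A's queue empties and it returns None, not an int).
def Pre_solution (s : Int) (e : Int) : Prop := 1 ≤ s ∧ s ≤ 10000 ∧ 0 ≤ e ∧ e ≤ 10005
instance (s : Int) (e : Int) : Decidable (Pre_solution s e) := by unfold Pre_solution; infer_instance
def pvWitness_solution : Int × Int := (5, 14)

def Spec_solution (s : Int) (e : Int) (out : Int) : Prop := out = solution_alt s e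
instance (s : Int) (e : Int) (out : Int) : Decidable (Spec_solution s e out) := by unfold Spec_solution; infer_instance

-- ===== CLAIM (what is proved, stated in full; the proofs are below) =====
def Claim_equal_solution : Prop := ∀ (s : Int) (e : Int), Dom_solution s e → Pre_solution s e → Spec_solution s e (solution s e)

-- ===== LEMMAS AND PROOFS =====

-- x is one move away from y (y-1, y+1 or y+5)
def IsNbrI (y x : Int) : Prop := x = y - 1 ∨ x = y + 1 ∨ x = y + 5

-- Boolean: some node of q has e as a neighbour (A's early-return condition over a level)
def qHitB (e : Int) (q : List Int) : Bool :=
  q.any fun x => x - 1 == e || x + 1 == e || x + 5 == e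

-- small helpers about Array.set! / Array.replicate under `!` indexing
theorem arrSize_set {α : Type} (a : Array α) (i : Nat) (v : α) :
    (a.set! i v).size = a.size := by
  simp [Array.set!]

theorem arrGet_set_self {α : Type} [Inhabited α] (a : Array α) (i : Nat) (v : α)
    (h : i < a.size) : (a.set! i v)[i]! = v := by
  simp [Array.set!, h]

theorem arrGet_set_ne {α : Type} [Inhabited α] (a : Array α) (i j : Nat) (v : α)
    (h : j ≠ i) : (a.set! i v)[j]! = a[j]! := by
  simp [Array.set!, Array.getElem!_eq_getD, Array.getD]
  split_ifs with hj
  · rw [Array.getElem_setIfInBounds]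
    simp [Ne.symm h]
    exact hj
  · rfl

theorem arrGet_replicate {α : Type} [Inhabited α] (v : α) (i : Nat) (h : i < 10001) :
    (Array.replicate 10001 v)[i]! = v := by
  simp [h]

-- A's inner neighbour loop returns early exactly when e is among the three neighbours
theorem aNbr_fst (e L : Int) (nbrs : List Int) :
    ∀ check next, (aNbr e L nbrs check next).1 = if e ∈ nbrs then some (L + 1) else none := by
  induction nbrs with
  | nil => intro check next; simp [aNbr]
  | cons nx rest ih =>
    intro check next
    by_cases h : nx = e
    · subst h; simp [aNbr]
    · have hm : (e ∈ nx :: rest) ↔ (e ∈ rest) := by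
        constructor
        · intro hh
          rcases List.mem_cons.mp hh with h1 | h1
          · exact absurd h1.symm h
          · exact h1
        · exact List.mem_cons_of_mem _
      by_cases hg : nx > 0 ∧ nx ≤ 10000 ∧ check[nx.toNat]! = 0
      · simp [aNbr, h, hg, ih, hm]
      · simp [aNbr, h, hg, ih, hm]

-- A's level loop returns early exactly when some node of the level neighbours e
theorem aLevel_fst (e L : Int) (q : List Int) :
    ∀ check next, (aLevel e L q check next).1 = if qHitB e q then some (L + 1) else none := by
  induction q with
  | nil => intro check next; simp [aLevel, qHitB]
  | cons now rest ih =>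
    intro check next
    rcases hA : aNbr e L [now - 1, now + 1, now + 5] check next with ⟨o, c, n⟩
    have h1 := aNbr_fst e L [now - 1, now + 1, now + 5] check next
    rw [hA] at h1
    by_cases hd : e ∈ [now - 1, now + 1, now + 5]
    · rw [if_pos hd] at h1
      have h1' : o = some (L + 1) := h1
      subst h1'
      have hnode : (now - 1 == e || now + 1 == e || now + 5 == e) = true := by
        simp only [List.mem_cons, List.not_mem_nil, or_false] at hd
        rcases hd with h | h | h <;> simp [h]
      have hb : qHitB e (now :: rest) = true := by
        simp [qHitB, List.any_cons, hnode]
      simp [aLevel, hA, hb]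
    · rw [if_neg hd] at h1
      have h1' : o = none := h1
      subst h1'
      have hnode : (now - 1 == e || now + 1 == e || now + 5 == e) = false := by
        simp only [List.mem_cons, List.not_mem_nil, or_false, not_or] at hd
        simp only [Bool.or_eq_false_iff, beq_eq_false_iff_ne, ne_eq]
        omega
      have hb : qHitB e (now :: rest) = qHitB e rest := by
        simp [qHitB, List.any_cons, hnode]
      simp [aLevel, hA, hb, ih]

theorem qHitB_iff (e : Int) (q : List Int) :
    qHitB e q = true ↔ ∃ y ∈ q, IsNbrI y e := by
  simp only [qHitB, List.any_eq_true, Bool.or_eq_true, beq_iff_eq, IsNbrI]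
  constructor
  · rintro ⟨y, hy, h⟩; exact ⟨y, hy, by omega⟩
  · rintro ⟨y, hy, h⟩; exact ⟨y, hy, by omega⟩

-- characterisation of A's inner neighbour loop when it does not hit e
theorem aNbr_char (e L : Int) (nbrs : List Int) :
    ∀ check next, check.size = 10001 →
      (∀ i : Nat, i ≤ 10000 → check[i]! = 0 ∨ check[i]! = 1) →
      e ∉ nbrs →
      (aNbr e L nbrs check next).2.1.size = 10001 ∧
      (∀ i : Nat, i ≤ 10000 → (aNbr e L nbrs check next).2.1[i]! = 0 ∨ (aNbr e L nbrs check next).2.1[i]! = 1) ∧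
      (∀ i : Nat, i ≤ 10000 →
        ((aNbr e L nbrs check next).2.1[i]! = 1 ↔ check[i]! = 1 ∨ (1 ≤ (i : Int) ∧ (i : Int) ∈ nbrs))) ∧
      (∀ x : Int, x ∈ (aNbr e L nbrs check next).2.2 ↔
        x ∈ next ∨ (0 < x ∧ x ≤ 10000 ∧ x ∈ nbrs ∧ check[x.toNat]! = 0)) := by
  induction nbrs with
  | nil =>
    intro check next hsz h01 _
    refine ⟨hsz, h01, ?_, ?_⟩
    · intro i _; simp [aNbr]
    · intro x; simp [aNbr]
  | cons nx rest ih =>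
    intro check next hsz h01 hne
    have hnxe : ¬ nx = e := fun h => hne (by simp [h])
    have hrest : e ∉ rest := fun h => hne (List.mem_cons_of_mem _ h)
    by_cases hg : nx > 0 ∧ nx ≤ 10000 ∧ check[nx.toNat]! = 0
    · have hstep : aNbr e L (nx :: rest) check next
          = aNbr e L rest (check.set! nx.toNat 1) (next ++ [nx]) := by
        simp [aNbr, hnxe, hg]
      have hlt : nx.toNat < check.size := by rw [hsz]; omega
      have hsz' : (check.set! nx.toNat 1).size = 10001 := by rw [arrSize_set, hsz]
      have hget : ∀ i : Nat, (check.set! nx.toNat 1)[i]! = if i = nx.toNat then 1 else check[i]! := by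
        intro i
        by_cases hij : i = nx.toNat
        · subst hij; rw [arrGet_set_self _ _ _ hlt]; simp
        · rw [arrGet_set_ne _ _ _ _ hij]; simp [hij]
      have h01' : ∀ i : Nat, i ≤ 10000 → (check.set! nx.toNat 1)[i]! = 0 ∨ (check.set! nx.toNat 1)[i]! = 1 := by
        intro i hi
        rw [hget]
        split_ifs
        · exact Or.inr rfl
        · exact h01 i hi
      obtain ⟨s1, s2, s3, s4⟩ := ih (check.set! nx.toNat 1) (next ++ [nx]) hsz' h01' hrest
      rw [hstep]
      refine ⟨s1, s2, ?_, ?_⟩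
      · intro i hi
        rw [s3 i hi, hget]
        by_cases hij : i = nx.toNat
        · subst hij
          have hcast : ((nx.toNat : Nat) : Int) = nx := by omega
        
          constructor
          · intro _
            exact Or.inr ⟨by omega, by rw [hcast]; exact List.mem_cons_self⟩
          · intro _; exact Or.inl (by simp)
        · have hcast : ¬ ((i : Int) = nx) := by omega
          simp only [if_neg hij]
          constructor
          · rintro (h | ⟨h1, h2⟩)
            · exact Or.inl h
            · exact Or.inr ⟨h1, List.mem_cons_of_mem _ h2⟩
          · rintro (h | ⟨h1, h2⟩)
            · exact Or.inl h
            · rcases List.mem_cons.mp h2 with h3 | h3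
              · exact absurd h3 hcast
              · exact Or.inr ⟨h1, h3⟩
      · intro x
        rw [s4 x]
        by_cases hx : x = nx
        · subst hx
          constructor
          · intro _
            exact Or.inr ⟨hg.1, hg.2.1, List.mem_cons_self, hg.2.2⟩
          · intro _
            exact Or.inl (by simp)
        · have htn : ∀ (h0 : 0 < x), x.toNat ≠ nx.toNat := by intro h0 hh; omega
          constructor
          · rintro (h | ⟨h1, h2, h3, h4⟩)
            · rcases List.mem_append.mp h with h5 | h5
              · exact Or.inl h5
              · exact absurd (List.mem_singleton.mp h5) hx
            · rw [hget, if_neg (htn h1)] at h4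
              exact Or.inr ⟨h1, h2, List.mem_cons_of_mem _ h3, h4⟩
          · rintro (h | ⟨h1, h2, h3, h4⟩)
            · exact Or.inl (List.mem_append.mpr (Or.inl h))
            · rcases List.mem_cons.mp h3 with h5 | h5
              · exact absurd h5 hx
              · exact Or.inr ⟨h1, h2, h5, by rw [hget, if_neg (htn h1)]; exact h4⟩
    · have hstep : aNbr e L (nx :: rest) check next = aNbr e L rest check next := by
        simp [aNbr, hnxe, hg]
      obtain ⟨s1, s2, s3, s4⟩ := ih check next hsz h01 hrest
      rw [hstep]
      refine ⟨s1, s2, ?_, ?_⟩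
      · intro i hi
        rw [s3 i hi]
        by_cases hix : (i : Int) = nx ∧ 1 ≤ (i : Int)
        · have hnot0 : ¬ check[nx.toNat]! = 0 := by
            intro h0; exact hg ⟨by omega, by omega, h0⟩
          have hin : i = nx.toNat := by omega
          have h1 : check[i]! = 1 := by
            rcases h01 i hi with h | h
            · rw [hin] at h; exact absurd h hnot0
            · exact h
          simp [h1]
        · constructor
          · rintro (h | ⟨h1, h2⟩)
            · exact Or.inl h
            · exact Or.inr ⟨h1, List.mem_cons_of_mem _ h2⟩
          · rintro (h | ⟨h1, h2⟩)
            · exact Or.inl h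
            · rcases List.mem_cons.mp h2 with h3 | h3
              · exact absurd ⟨h3, h1⟩ hix
              · exact Or.inr ⟨h1, h3⟩
      · intro x
        rw [s4 x]
        constructor
        · rintro (h | ⟨h1, h2, h3, h4⟩)
          · exact Or.inl h
          · exact Or.inr ⟨h1, h2, List.mem_cons_of_mem _ h3, h4⟩
        · rintro (h | ⟨h1, h2, h3, h4⟩)
          · exact Or.inl h
          · rcases List.mem_cons.mp h3 with h5 | h5
            · subst h5
              exact absurd ⟨h1, h2, h4⟩ hg
            · exact Or.inr ⟨h1, h2, h5, h4⟩

-- characterisation of a whole level when no node of it neighbours e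
theorem aLevel_char (e L : Int) (q : List Int) :
    ∀ check next, check.size = 10001 →
      (∀ i : Nat, i ≤ 10000 → check[i]! = 0 ∨ check[i]! = 1) →
      (∀ y ∈ q, ¬ IsNbrI y e) →
      (aLevel e L q check next).2.1.size = 10001 ∧
      (∀ i : Nat, i ≤ 10000 → (aLevel e L q check next).2.1[i]! = 0 ∨ (aLevel e L q check next).2.1[i]! = 1) ∧
      (∀ i : Nat, i ≤ 10000 →
        ((aLevel e L q check next).2.1[i]! = 1 ↔ check[i]! = 1 ∨ (1 ≤ (i : Int) ∧ ∃ y ∈ q, IsNbrI y (i : Int)))) ∧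
      (∀ x : Int, x ∈ (aLevel e L q check next).2.2 ↔
        x ∈ next ∨ (0 < x ∧ x ≤ 10000 ∧ (∃ y ∈ q, IsNbrI y x) ∧ check[x.toNat]! = 0)) := by
  induction q with
  | nil =>
    intro check next hsz h01 _
    refine ⟨hsz, h01, ?_, ?_⟩
    · intro i _; simp [aLevel]
    · intro x; simp [aLevel]
  | cons now rest ih =>
    intro check next hsz h01 hq
    have hnow : ¬ IsNbrI now e := hq now List.mem_cons_self
    have hrest : ∀ y ∈ rest, ¬ IsNbrI y e := fun y hy => hq y (List.mem_cons_of_mem _ hy)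
    have hne : e ∉ [now - 1, now + 1, now + 5] := by
      simp only [List.mem_cons, List.not_mem_nil, or_false, not_or]
      unfold IsNbrI at hnow
      omega
    have hmem : ∀ z : Int, z ∈ [now - 1, now + 1, now + 5] ↔ IsNbrI now z := by
      intro z
      simp only [List.mem_cons, List.not_mem_nil, or_false, IsNbrI]
    obtain ⟨t1, t2, t3, t4⟩ := aNbr_char e L [now - 1, now + 1, now + 5] check next hsz h01 hne
    have hfst := aNbr_fst e L [now - 1, now + 1, now + 5] check next
    rw [if_neg hne] at hfst
    rcases hA : aNbr e L [now - 1, now + 1, now + 5] check next with ⟨o, c1, n1⟩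
    rw [hA] at hfst t1 t2 t3 t4
    have ho : o = none := hfst
    subst ho
    have hstep : aLevel e L (now :: rest) check next = aLevel e L rest c1 n1 := by
      simp [aLevel, hA]
    obtain ⟨s1, s2, s3, s4⟩ := ih c1 n1 t1 t2 hrest
    rw [hstep]
    refine ⟨s1, s2, ?_, ?_⟩
    · intro i hi
      rw [s3 i hi, t3 i hi]
      constructor
      · rintro ((h | ⟨h1, h2⟩) | ⟨h1, h2⟩)
        · exact Or.inl h
        · exact Or.inr ⟨h1, now, List.mem_cons_self, (hmem _).mp h2⟩
        · rcases h2 with ⟨y, hy, h3⟩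
          exact Or.inr ⟨h1, y, List.mem_cons_of_mem _ hy, h3⟩
      · rintro (h | ⟨h1, y, hy, h3⟩)
        · exact Or.inl (Or.inl h)
        · rcases List.mem_cons.mp hy with h5 | h5
          · subst h5
            exact Or.inl (Or.inr ⟨h1, (hmem _).mpr h3⟩)
          · exact Or.inr ⟨h1, y, h5, h3⟩
    · intro x
      rw [s4 x, t4 x]
      constructor
      · rintro ((h | ⟨h1, h2, h3, h4⟩) | ⟨h1, h2, h3, h4⟩)
        · exact Or.inl h
        · exact Or.inr ⟨h1, h2, ⟨now, List.mem_cons_self, (hmem _).mp h3⟩, h4⟩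
        · -- h4 : c1[x.toNat]! = 0 → check also 0
          have hxt : x.toNat ≤ 10000 := by omega
          have hc : check[x.toNat]! = 0 := by
            rcases h01 x.toNat hxt with h | h
            · exact h
            · exfalso
              have : c1[x.toNat]! = 1 := (t3 x.toNat hxt).mpr (Or.inl h)
              omega
          rcases h3 with ⟨y, hy, h5⟩
          exact Or.inr ⟨h1, h2, ⟨y, List.mem_cons_of_mem _ hy, h5⟩, hc⟩
      · rintro (h | ⟨h1, h2, ⟨y, hy, h5⟩, h4⟩)
        · exact Or.inl (Or.inl h)
        · have hxt : x.toNat ≤ 10000 := by omega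
          rcases List.mem_cons.mp hy with h6 | h6
          · subst h6
            exact Or.inl (Or.inr ⟨h1, h2, (hmem _).mpr h5, h4⟩)
          · -- x is a neighbour of a later node; need c1[x.toNat]! = 0 or already in n1
            by_cases hc1 : c1[x.toNat]! = 0
            · exact Or.inr ⟨h1, h2, ⟨y, h6, h5⟩, hc1⟩
            · -- c1 = 1 but check = 0: x was marked by now's expansion, so x ∈ n1
              have hc11 : c1[x.toNat]! = 1 := by
                rcases t2 x.toNat hxt with h | h
                · exact absurd h hc1
                · exact h
              have := (t3 x.toNat hxt).mp hc11
              rcases this with h7 | ⟨h7, h8⟩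
              · omega
              · rw [Int.toNat_of_nonneg (by omega)] at h8
                exact Or.inl (Or.inr ⟨h1, h2, h8, h4⟩)

-- the bits of one bit-parallel round, unfolded
theorem testBit_bNext (reach : Nat) (i : Nat) :
    (bNext reach).testBit i = true ↔
      (1 ≤ i ∧ i ≤ 10000 ∧
        (reach.testBit i = true ∨ (1 ≤ i ∧ reach.testBit (i - 1) = true) ∨
         reach.testBit (i + 1) = true ∨ (5 ≤ i ∧ reach.testBit (i - 5) = true))) := by
  simp only [bNext, bBoard, Nat.one_shiftLeft, Nat.testBit_and, Nat.testBit_or,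
    Nat.testBit_shiftLeft, Nat.testBit_shiftRight, Nat.testBit_two_pow_sub_one,
    Bool.and_eq_true, Bool.or_eq_true, decide_eq_true_eq]
  constructor
  · rintro ⟨h1, h2, h3⟩
    refine ⟨by omega, by omega, ?_⟩
    rcases h1 with (h | h) | h
    · rcases h with h | ⟨hd, h⟩
      · exact Or.inl h
      · exact Or.inr (Or.inl ⟨hd, h⟩)
    · exact Or.inr (Or.inr (Or.inl (by simpa [Nat.add_comm] using h)))
    · exact Or.inr (Or.inr (Or.inr h))
  · rintro ⟨h1, h2, h3⟩
    refine ⟨?_, h1, by omega⟩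
    rcases h3 with h | h | h | h
    · exact Or.inl (Or.inl (Or.inl h))
    · exact Or.inl (Or.inl (Or.inr h))
    · exact Or.inl (Or.inr (by simpa [Nat.add_comm] using h))
    · exact Or.inr h

-- the simulation invariant between A's state (check, queue) and B's bitmask
def SimInv (e : Int) (check : Array Int) (q : List Int) (reach : Nat) : Prop :=
  check.size = 10001 ∧
  (∀ i : Nat, i ≤ 10000 → check[i]! = if reach.testBit i = true then 1 else 0) ∧
  (∀ i : Nat, reach.testBit i = true → 1 ≤ i ∧ i ≤ 10000) ∧
  (∀ x ∈ q, 1 ≤ x ∧ x ≤ 10000 ∧ reach.testBit x.toNat = true) ∧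
  (∀ i : Nat, reach.testBit i = true → (i : Int) ∉ q →
      ∀ x : Int, IsNbrI (i : Int) x → 1 ≤ x → x ≤ 10000 → reach.testBit x.toNat = true) ∧
  (∀ i : Nat, reach.testBit i = true → (i : Int) ∉ q → ¬ IsNbrI (i : Int) e)

-- under the invariant, B's O(1) goal test fires iff some node of A's current level neighbours e
theorem bHit_iff (e : Int) (check : Array Int) (q : List Int) (reach : Nat)
    (hInv : SimInv e check q reach) : bHit reach e = true ↔ ∃ y ∈ q, IsNbrI y e := by
  obtain ⟨-, -, h3, h4, h5, h6⟩ := hInv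
  have key : ∀ x : Int, 1 ≤ x → x ≤ 10000 → reach.testBit x.toNat = true → IsNbrI x e →
      ∃ y ∈ q, IsNbrI y e := by
    intro x hx1 hx2 hbit hnb
    by_cases hxq : x ∈ q
    · exact ⟨x, hxq, hnb⟩
    · exfalso
      have hcast : ((x.toNat : Nat) : Int) = x := Int.toNat_of_nonneg (by omega)
      have h := h6 x.toNat hbit (by rw [hcast]; exact hxq)
      rw [hcast] at h
      exact h hnb
  simp only [bHit, List.any_cons, List.any_nil, Bool.or_false, Bool.or_eq_true,
    Bool.and_eq_true, decide_eq_true_eq]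
  constructor
  · rintro (⟨⟨ha, hb⟩, hc⟩ | ⟨⟨ha, hb⟩, hc⟩ | ⟨⟨ha, hb⟩, hc⟩)
    · exact key _ ha hb hc (by unfold IsNbrI; omega)
    · exact key _ ha hb hc (by unfold IsNbrI; omega)
    · exact key _ ha hb hc (by unfold IsNbrI; omega)
  · rintro ⟨y, hy, hnb⟩
    obtain ⟨hy1, hy2, hybit⟩ := h4 y hy
    rcases hnb with h | h | h
    · exact Or.inl ⟨⟨by omega, by omega⟩, by rw [show e + 1 = y by omega]; exact hybit⟩
    · exact Or.inr (Or.inl ⟨⟨by omega, by omega⟩, by rw [show e - 1 = y by omega]; exact hybit⟩)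
    · exact Or.inr (Or.inr ⟨⟨by omega, by omega⟩, by rw [show e - 5 = y by omega]; exact hybit⟩)

-- under the invariant, one bit-parallel round computes exactly "visited or neighbour of the level"
theorem bNext_bits (e : Int) (check : Array Int) (q : List Int) (reach : Nat)
    (hInv : SimInv e check q reach) (i : Nat) (hi : i ≤ 10000) :
    (bNext reach).testBit i = true ↔
      (reach.testBit i = true ∨ (1 ≤ (i : Int) ∧ ∃ y ∈ q, IsNbrI y (i : Int))) := by
  obtain ⟨-, -, h3, h4, h5, h6⟩ := hInv
  rw [testBit_bNext]
  constructor
  · rintro ⟨hm1, hm2, hbits⟩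
    rcases hbits with h | ⟨hd, h⟩ | h | ⟨hd, h⟩
    · exact Or.inl h
    · by_cases hq : ((i - 1 : Nat) : Int) ∈ q
      · exact Or.inr ⟨by omega, _, hq, by unfold IsNbrI; omega⟩
      · have h' := h5 (i - 1) h hq (i : Int) (by unfold IsNbrI; omega) (by omega) (by omega)
        rw [Int.toNat_natCast] at h'
        exact Or.inl h'
    · by_cases hq : ((i + 1 : Nat) : Int) ∈ q
      · exact Or.inr ⟨by omega, _, hq, by unfold IsNbrI; omega⟩
      · have h' := h5 (i + 1) h hq (i : Int) (by unfold IsNbrI; omega) (by omega) (by omega)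
        rw [Int.toNat_natCast] at h'
        exact Or.inl h'
    · by_cases hq : ((i - 5 : Nat) : Int) ∈ q
      · exact Or.inr ⟨by omega, _, hq, by unfold IsNbrI; omega⟩
      · have h' := h5 (i - 5) h hq (i : Int) (by unfold IsNbrI; omega) (by omega) (by omega)
        rw [Int.toNat_natCast] at h'
        exact Or.inl h'
  · rintro (h | ⟨h1, y, hy, hnb⟩)
    · obtain ⟨ha, hb⟩ := h3 i h
      exact ⟨ha, hb, Or.inl h⟩
    · obtain ⟨hy1, hy2, hybit⟩ := h4 y hy
      refine ⟨by omega, hi, ?_⟩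
      rcases hnb with h | h | h
      · have hyt : y.toNat = i + 1 := by omega
        rw [← hyt]
        exact Or.inr (Or.inr (Or.inl hybit))
      · have h1' : 1 ≤ i := by omega
        have hyt : y.toNat = i - 1 := by omega
        exact Or.inr (Or.inl ⟨h1', by rw [← hyt]; exact hybit⟩)
      · have h5' : 5 ≤ i := by omega
        have hyt : y.toNat = i - 5 := by omega
        exact Or.inr (Or.inr (Or.inr ⟨h5', by rw [← hyt]; exact hybit⟩))

-- an empty queue makes A's loop return None whatever the fuel
theorem aLoop_nil (e : Int) (fuel : Nat) (check : Array Int) (L : Int) :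
    aLoop e fuel [] check L = none := by
  cases fuel <;> simp [aLoop]

-- lock-step simulation of the two outer loops
theorem loop_sim (e : Int) (fuel : Nat) :
    ∀ (q : List Int) (check : Array Int) (reach : Nat) (L : Int),
      SimInv e check q reach → aLoop e fuel q check L = bLoop e fuel reach L := by
  induction fuel with
  | zero => intro q check reach L _; rfl
  | succ fuel ih =>
    intro q check reach L hInv
    obtain ⟨h1, h2, h3, h4, h5, h6⟩ := hInv
    have h01 : ∀ i : Nat, i ≤ 10000 → check[i]! = 0 ∨ check[i]! = 1 := by
      intro i hi
      rw [h2 i hi]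
      split_ifs
      · exact Or.inr rfl
      · exact Or.inl rfl
    by_cases hq : q.isEmpty
    · have hqnil : q = [] := List.isEmpty_iff.mp hq
      subst hqnil
      have hbh : bHit reach e = false := by
        cases hb : bHit reach e
        · rfl
        · exfalso
          rcases (bHit_iff e check [] reach ⟨h1, h2, h3, h4, h5, h6⟩).mp hb with ⟨y, hy, -⟩
          simp at hy
      have heq : bNext reach = reach := by
        apply Nat.eq_of_testBit_eq
        intro i
        by_cases hr : reach.testBit i = true
        · rw [hr, (bNext_bits e check [] reach ⟨h1, h2, h3, h4, h5, h6⟩ i (h3 i hr).2).mpr (Or.inl hr)]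
        · cases hb : (bNext reach).testBit i
          · rw [Bool.not_eq_true] at hr
            rw [hr]
          · exfalso
            have hi : i ≤ 10000 := ((testBit_bNext reach i).mp hb).2.1
            rcases (bNext_bits e check [] reach ⟨h1, h2, h3, h4, h5, h6⟩ i hi).mp hb with h | ⟨-, y, hy, -⟩
            · exact hr h
            · simp at hy
      simp [aLoop, bLoop, hbh, heq]
    · by_cases hhit : ∃ y ∈ q, IsNbrI y e
      · have hbh : bHit reach e = true := (bHit_iff e check q reach ⟨h1, h2, h3, h4, h5, h6⟩).mpr hhit
        have hfst := aLevel_fst e L q check []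
        rw [if_pos ((qHitB_iff e q).mpr hhit)] at hfst
        rcases hA : aLevel e L q check [] with ⟨o, c, n⟩
        rw [hA] at hfst
        have ho : o = some (L + 1) := hfst
        subst ho
        simp [aLoop, bLoop, hq, hA, hbh]
      · have hbh : bHit reach e = false := by
          cases hb : bHit reach e
          · rfl
          · exact absurd ((bHit_iff e check q reach ⟨h1, h2, h3, h4, h5, h6⟩).mp hb) hhit
        have hqh : qHitB e q = false := by
          cases hb : qHitB e q
          · rfl
          · exact absurd ((qHitB_iff e q).mp hb) hhit
        have hfst := aLevel_fst e L q check []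
        rw [hqh, if_neg (by simp)] at hfst
        have hnoq : ∀ y ∈ q, ¬ IsNbrI y e := fun y hy hnb => hhit ⟨y, hy, hnb⟩
        obtain ⟨s1, s2, s3, s4⟩ := aLevel_char e L q check [] h1 h01 hnoq
        rcases hA : aLevel e L q check [] with ⟨o, c, n⟩
        rw [hA] at hfst s1 s2 s3 s4
        have ho : o = none := hfst
        subst ho
        have hbits := bNext_bits e check q reach ⟨h1, h2, h3, h4, h5, h6⟩
        -- the new states satisfy the invariant
        have hInv' : SimInv e c n (bNext reach) := by
          refine ⟨s1, ?_, ?_, ?_, ?_, ?_⟩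
          · intro i hi
            by_cases hbit : (bNext reach).testBit i = true
            · rw [if_pos hbit]
              apply (s3 i hi).mpr
              rcases (hbits i hi).mp hbit with h | h
              · exact Or.inl (by rw [h2 i hi, if_pos h])
              · exact Or.inr h
            · rw [if_neg hbit]
              rcases s2 i hi with h | h
              · exact h
              · exfalso
                rcases (s3 i hi).mp h with h' | h'
                · have hr : reach.testBit i = true := by
                    rw [h2 i hi] at h'
                    by_contra hr
                    rw [if_neg hr] at h'
                    omega
                  exact hbit ((hbits i hi).mpr (Or.inl hr))
                · exact hbit ((hbits i hi).mpr (Or.inr h'))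
          · intro i h
            have := (testBit_bNext (reach) i).mp h
            omega
          · intro x hx
            rcases (s4 x).mp hx with h | ⟨hx1, hx2, hx3, hx4⟩
            · simp at h
            · have hxt : x.toNat ≤ 10000 := by omega
              have hcast : ((x.toNat : Nat) : Int) = x := Int.toNat_of_nonneg (by omega)
              refine ⟨by omega, hx2, ?_⟩
              apply (hbits x.toNat hxt).mpr
              right
              rw [hcast]
              exact ⟨by omega, hx3⟩
          · intro i hbit hnq x hnb hx1 hx2
            have hi : i ≤ 10000 := ((testBit_bNext reach i).mp hbit).2.1
            have hxt : x.toNat ≤ 10000 := by omega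
            have hxcast : ((x.toNat : Nat) : Int) = x := Int.toNat_of_nonneg (by omega)
            by_cases hr : reach.testBit i = true
            · by_cases hiq : (i : Int) ∈ q
              · apply (hbits x.toNat hxt).mpr
                right
                rw [hxcast]
                exact ⟨by omega, (i : Int), hiq, hnb⟩
              · have := h5 i hr hiq x hnb hx1 hx2
                exact (hbits x.toNat hxt).mpr (Or.inl this)
            · exfalso
              apply hnq
              rcases (hbits i hi).mp hbit with h | ⟨hg1, hg2⟩
              · exact absurd h hr
              · apply (s4 (i : Int)).mpr
                right
                have hchk : check[i]! = 0 := by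
                  rw [h2 i hi, if_neg hr]
                refine ⟨by omega, by omega, ?_, by rw [Int.toNat_natCast]; exact hchk⟩
                exact hg2
          · intro i hbit hnq
            have hi : i ≤ 10000 := ((testBit_bNext reach i).mp hbit).2.1
            by_cases hr : reach.testBit i = true
            · by_cases hiq : (i : Int) ∈ q
              · exact fun hnb => hhit ⟨(i : Int), hiq, hnb⟩
              · exact h6 i hr hiq
            · exfalso
              apply hnq
              rcases (hbits i hi).mp hbit with h | ⟨hg1, hg2⟩
              · exact absurd h hr
              · apply (s4 (i : Int)).mpr
                right
                have hchk : check[i]! = 0 := by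
                  rw [h2 i hi, if_neg hr]
                exact ⟨by omega, by omega, hg2, by rw [Int.toNat_natCast]; exact hchk⟩
        by_cases heq : bNext reach = reach
        · have hnnil : n = [] := by
            cases hn : n with
            | nil => rfl
            | cons x xs =>
              exfalso
              have hx : x ∈ n := by rw [hn]; exact List.mem_cons_self
              rcases (s4 x).mp hx with h | ⟨hx1, hx2, hx3, hx4⟩
              · simp at h
              · have hxt : x.toNat ≤ 10000 := by omega
                have hcast : ((x.toNat : Nat) : Int) = x := Int.toNat_of_nonneg (by omega)
                have hb : (bNext reach).testBit x.toNat = true := by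
                  apply (hbits x.toNat hxt).mpr
                  right
                  rw [hcast]
                  exact ⟨by omega, hx3⟩
                have hr : ¬ reach.testBit x.toNat = true := by
                  intro hr
                  rw [h2 x.toNat hxt, if_pos hr] at hx4
                  omega
                rw [heq] at hb
                exact hr hb
          have hB : bLoop e (fuel + 1) reach L = none := by
            simp [bLoop, hbh, heq]
          have hAstep : aLoop e (fuel + 1) q check L = aLoop e fuel n c (L + 1) := by
            simp [aLoop, hq, hA]
          rw [hAstep, hB, hnnil, aLoop_nil]
        · have hB : bLoop e (fuel + 1) reach L = bLoop e fuel (bNext reach) (L + 1) := by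
            simp [bLoop, hbh, heq]
          have hAstep : aLoop e (fuel + 1) q check L = aLoop e fuel n c (L + 1) := by
            simp [aLoop, hq, hA]
          rw [hAstep, hB]
          exact ih n c (bNext reach) (L + 1) hInv'

-- the initial states satisfy the invariant
theorem init_inv (s e : Int) (hs1 : 1 ≤ s) (hs2 : s ≤ 10000) :
    SimInv e ((Array.replicate 10001 0).set! s.toNat 1) [s] (1 <<< s.toNat) := by
  have hbit : ∀ i : Nat, (1 <<< s.toNat : Nat).testBit i = true ↔ i = s.toNat := by
    intro i
    rw [Nat.one_shiftLeft]
    simp [Nat.testBit_two_pow]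
    exact eq_comm
  have hlt : s.toNat < ((Array.replicate 10001 (0 : Int))).size := by
    simp
    omega
  have hget : ∀ i : Nat, ((Array.replicate 10001 (0 : Int)).set! s.toNat 1)[i]!
      = if i = s.toNat then 1 else 0 := by
    intro i
    by_cases hij : i = s.toNat
    · subst hij
      rw [arrGet_set_self _ _ _ hlt]
      simp
    · rw [arrGet_set_ne _ _ _ _ hij]
      by_cases hi : i < 10001
      · rw [arrGet_replicate _ _ hi]
        simp [hij]
      · rw [if_neg hij]
        have hge : ¬ i < (Array.replicate 10001 (0 : Int)).size := by
          simp
          omega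
        simp [Array.getElem!_eq_getD, Array.getD]
  refine ⟨by rw [arrSize_set]; simp, ?_, ?_, ?_, ?_, ?_⟩
  · intro i _
    rw [hget]
    by_cases hij : i = s.toNat
    · simp [hij, Nat.one_shiftLeft]
    · have : ¬ (1 <<< s.toNat : Nat).testBit i = true := fun h => hij ((hbit i).mp h)
      simp [hij, this]
  · intro i h
    have := (hbit i).mp h
    omega
  · intro x hx
    have hxs : x = s := by simpa using hx
    subst hxs
    exact ⟨hs1, hs2, (hbit x.toNat).mpr rfl⟩
  · intro i h hq
    exfalso
    have his : i = s.toNat := (hbit i).mp h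
    apply hq
    simp [his]
    omega
  · intro i h hq
    exfalso
    have his : i = s.toNat := (hbit i).mp h
    apply hq
    simp [his]
    omega

-- ===== VERDICT (by name: the statement is the Claim_ definition above) =====
theorem solution_spec : Claim_equal_solution := by
  intro s e _ hpre
  unfold Spec_solution solution solution_alt
  rw [loop_sim e 20000 [s] _ _ 0 (init_inv s e hpre.1 hpre.2.1)]
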